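-- pv_equiv track=rewrite | github.com/shenyedepisa/OUC_DataMining_2023_Fall | exp3/prefixSpan.py | dd
-- ===== SOURCE A (Python) =====
-- def dd(ll, da):
--     flag = 0
--     str1 = []
--     for l in ll:
--         if flag == 0:
--             if len(l) == 1 and l[0] == da:
--                 flag = 1
--                 continue
--             elif len(l) > 1:
--                 if l[-1] == da:
--                     flag = 1
--                     continue
--                 tmp = []
--                 for i in l:
--                     if flag == 0:
--                         tmp = []
--                         if i == da:
--                             flag = 1
--                             tmp.append('_')
--                     else:
--                         tmp.append(i)
--                 if len(tmp) > 0: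
--                     str1.append(tmp)
--         else:
--             str1.append(l)
--     # 返回找到的后缀, 如未找到str1为空
--     return str1
-- ===== SOURCE B (Python) =====
-- def dd(ll, da):
--     for idx, l in enumerate(ll):
--         if len(l) == 1:
--             if l[0] == da:
--                 return list(ll[idx + 1:])
--         elif len(l) > 1:
--             if l[-1] == da:
--                 return list(ll[idx + 1:])
--             if da in l:
--                 return [['_'] + l[l.index(da) + 1:]] + list(ll[idx + 1:])
--     return []
-- ===== Notes on version B (the rewrite author's own statement) =====
-- stated objective: simpler
-- what changed: Replaces the flag-state fold that copies the tail element by element (and an inner flag-driven rebuild of the partial suffix) with a single scan that finds the first matching itemset and returns the tail by slicing, using list.index for the partial suffix.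
import Mathlib
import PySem

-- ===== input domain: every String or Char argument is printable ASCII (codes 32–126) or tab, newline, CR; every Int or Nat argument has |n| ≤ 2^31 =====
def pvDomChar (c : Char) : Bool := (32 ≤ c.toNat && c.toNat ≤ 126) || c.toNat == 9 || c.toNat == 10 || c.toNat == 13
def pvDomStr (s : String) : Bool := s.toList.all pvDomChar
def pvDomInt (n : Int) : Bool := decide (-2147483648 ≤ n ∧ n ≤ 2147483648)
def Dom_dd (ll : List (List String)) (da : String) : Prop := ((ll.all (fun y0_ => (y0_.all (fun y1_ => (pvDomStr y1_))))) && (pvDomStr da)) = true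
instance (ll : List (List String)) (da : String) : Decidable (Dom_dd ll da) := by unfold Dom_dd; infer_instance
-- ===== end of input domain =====

-- B replaces A's flag-state fold (which copies the tail element by element and rebuilds the
-- partial suffix with an inner flag loop) by a single scan to the first match plus slicing: simpler.

-- ===== PORT A =====
-- inner loop over one itemset l, state (flag, tmp); starts with flag = 0, tmp = []
def ddInner (da : String) (l : List String) : Bool × List String :=
  l.foldl (fun st i =>
    if st.1 = false then
      (if i = da then (true, ["_"]) else (false, ([] : List String)))
    else (st.1, st.2 ++ [i])) (false, [])

-- outer loop body, state (flag, str1); branch order as in A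
def ddStep (da : String) (st : Bool × List (List String)) (l : List String) : Bool × List (List String) :=
  if st.1 = false then
    if l.length = 1 ∧ l.headD "" = da then (true, st.2)          -- l[0] == da (len l = 1 here)
    else if l.length > 1 then
      if l.getLastD "" = da then (true, st.2)                    -- l[-1] == da (len l > 1 here)
      else
        let r := ddInner da l
        if r.2.length > 0 then (r.1, st.2 ++ [r.2]) else (r.1, st.2)
    else st
  else (st.1, st.2 ++ [l])

def dd (ll : List (List String)) (da : String) : List (List String) :=
  (ll.foldl (ddStep da) (false, [])).2

-- ===== PORT B =====
def dd_alt (ll : List (List String)) (da : String) : List (List String) :=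
  match ll with
  | [] => []
  | l :: rest =>
    if l.length = 1 then
      if l.headD "" = da then rest else dd_alt rest da
    else if l.length > 1 then
      if l.getLastD "" = da then rest
      else
        match PySem.List.index? l da with                        -- 'da in l' + 'l.index(da)'
        | some k => (["_"] ++ l.drop (k + 1)) :: rest
        | none => dd_alt rest da
    else dd_alt rest da

-- ===== PRECONDITION & SPEC =====
def Spec_dd (ll : List (List String)) (da : String) (out : List (List String)) : Prop := out = dd_alt ll da
instance (ll : List (List String)) (da : String) (out : List (List String)) : Decidable (Spec_dd ll da out) := by unfold Spec_dd; infer_instance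

-- ===== CLAIM (what is proved, stated in full; the proofs are below) =====
def Claim_equal_dd : Prop := ∀ (ll : List (List String)) (da : String), Dom_dd ll da → Spec_dd ll da (dd ll da)

-- ===== LEMMAS AND PROOFS =====

-- once the inner flag is set, the inner fold just appends the remaining items
theorem ddInner_true (da : String) (l : List String) (tmp : List String) :
    l.foldl (fun st i =>
      if st.1 = false then
        (if i = da then (true, ["_"]) else (false, ([] : List String)))
      else (st.1, st.2 ++ [i])) (true, tmp) = (true, tmp ++ l) := by
  induction l generalizing tmp with
  | nil => simp
  | cons x xs ih => simp [ih]

-- the inner loop computes exactly '_' followed by the part after the first occurrence of da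
theorem ddInner_eq (da : String) (l : List String) :
    ddInner da l = match PySem.List.index? l da with
      | some k => (true, "_" :: l.drop (k + 1))
      | none => (false, []) := by
  induction l with
  | nil => simp [ddInner, PySem.List.index?]
  | cons x xs ih =>
    by_cases hx : x = da
    · subst hx
      rw [ddInner, List.foldl_cons, if_pos rfl, if_pos rfl, ddInner_true,
        PySem.List.index?_cons_self]
      simp
    · rw [ddInner, List.foldl_cons, if_pos rfl, if_neg hx,
        show (xs.foldl (fun st i =>
          if st.1 = false then
            (if i = da then (true, ["_"]) else (false, ([] : List String)))
          else (st.1, st.2 ++ [i])) (false, [])) = ddInner da xs from rfl, ih,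
        PySem.List.index?_cons_of_ne xs hx]
      cases PySem.List.index? xs da with
      | none => simp
      | some k => simp

-- once the outer flag is set, the outer fold appends all remaining itemsets
theorem ddStep_true (da : String) (ll : List (List String)) (acc : List (List String)) :
    ll.foldl (ddStep da) (true, acc) = (true, acc ++ ll) := by
  induction ll generalizing acc with
  | nil => simp
  | cons l rest ih => simp [ddStep, ih]

theorem dd_fold_eq (da : String) (ll : List (List String)) (acc : List (List String)) :
    (ll.foldl (ddStep da) (false, acc)).2 = acc ++ dd_alt ll da := by
  induction ll generalizing acc with
  | nil => simp [dd_alt]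
  | cons l rest ih =>
    rw [List.foldl_cons]
    by_cases h1 : l.length = 1
    · by_cases hh : l.head?.getD "" = da
      · simp [ddStep, h1, hh, ddStep_true, dd_alt]
      · have h2 : ¬ l.length > 1 := by omega
        simp [ddStep, h1, hh, ih, dd_alt]
    · by_cases h2 : l.length > 1
      · by_cases hl : l.getLast?.getD "" = da
        · simp [ddStep, h1, h2, hl, ddStep_true, dd_alt]
        · rw [show ddStep da (false, acc) l =
              (let r := ddInner da l;
               if r.2.length > 0 then (r.1, acc ++ [r.2]) else (r.1, acc)) by
            simp [ddStep, h1, h2, hl]]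
          rw [ddInner_eq]
          cases hk : PySem.List.index? l da with
          | none =>
            rw [PySem.List.index?_eq_idxOf?] at hk
            simp [ih, dd_alt, h1, h2, hl, hk]
          | some k =>
            rw [PySem.List.index?_eq_idxOf?] at hk
            simp [ddStep_true, dd_alt, h1, h2, hl, hk]
      · have h0 : l.length = 0 := by omega
        simp [ddStep, ih, dd_alt, h0]

-- ===== VERDICT (by name: the statement is the Claim_ definition above) =====
theorem dd_spec : Claim_equal_dd := by
  intro ll da _
  unfold Spec_dd dd
  simpa using dd_fold_eq da ll []
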